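-- pv_equiv track=rewrite | github.com/gabrielconstantin02/NLP2-AspectBasedSentimentAnalisys | utils/general.py | ot2bieos_ts
-- ===== SOURCE A (Python) =====
-- def ot2bieos_ts(ts_tag_sequence):
--     """
--     ot2bieos function for targeted-sentiment task, ts refers to targeted -sentiment / aspect-based sentiment
--     :param ts_tag_sequence: tag sequence for targeted sentiment
--     :return:
--     """
--     n_tags = len(ts_tag_sequence)
--     new_ts_sequence = []
--     prev_pos = '$$$'
--     for i in range(n_tags):
--         cur_ts_tag = ts_tag_sequence[i]
--         if cur_ts_tag == 'O' or cur_ts_tag == 'EQ':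
--             # when meet the EQ label, regard it as O label
--             new_ts_sequence.append('O')
--             cur_pos = 'O'
--         else:
--             cur_pos, cur_sentiment = cur_ts_tag.split('-')
--             # cur_pos is T
--             if cur_pos != prev_pos:
--                 # prev_pos is O and new_cur_pos can only be B or S
--                 if i == n_tags - 1:
--                     new_ts_sequence.append('S-%s' % cur_sentiment)
--                 else:
--                     next_ts_tag = ts_tag_sequence[i + 1]
--                     if next_ts_tag == 'O':
--                         new_ts_sequence.append('S-%s' % cur_sentiment)
--                     else:
--                         new_ts_sequence.append('B-%s' % cur_sentiment)
--             else:
--                 # prev_pos is T and new_cur_pos can only be I or E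
--                 if i == n_tags - 1:
--                     new_ts_sequence.append('E-%s' % cur_sentiment)
--                 else:
--                     next_ts_tag = ts_tag_sequence[i + 1]
--                     if next_ts_tag == 'O':
--                         new_ts_sequence.append('E-%s' % cur_sentiment)
--                     else:
--                         new_ts_sequence.append('I-%s' % cur_sentiment)
--         prev_pos = cur_pos
--     return new_ts_sequence
-- ===== SOURCE B (Python) =====
-- def ot2bieos_ts(ts_tag_sequence):
--     def pos(t):
--         return 'O' if t == 'O' or t == 'EQ' else t.split('-')[0]
--
--     # stage 1: cut the sequence into maximal runs of equal extracted position
--     runs = []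
--     cur = []
--     for t in ts_tag_sequence:
--         if cur and pos(cur[0]) == pos(t):
--             cur.append(t)
--         else:
--             if cur:
--                 runs.append(cur)
--             cur = [t]
--     if cur:
--         runs.append(cur)
--
--     # stage 2: label each run; lookahead for a run's last element is the next run's first tag
--     out = []
--     for r, run in enumerate(runs):
--         nxt_after = runs[r + 1][0] if r + 1 < len(runs) else None
--         for k, t in enumerate(run):
--             if t == 'O' or t == 'EQ':
--                 out.append('O')
--                 continue
--             s = t.split('-')[1]
--             nxt = run[k + 1] if k + 1 < len(run) else nxt_after
--             end = nxt is None or nxt == 'O'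
--             head = ('S' if end else 'B') if k == 0 else ('E' if end else 'I')
--             out.append(head + '-' + s)
--     return out
-- ===== Notes on version B (the rewrite author's own statement) =====
-- stated objective: alternative
-- what changed: B replaces A's single stateful loop (prev_pos threading with nested last-index/next-tag branches) by a run-scanning algorithm: stage 1 cuts the sequence into maximal runs of equal extracted position, stage 2 labels each run, with S/B for the run's first tag and E/I otherwise, using the next run's first tag as lookahead.
-- intended difference: On sequences whose first tag has position part literally '$$$' (A's prev_pos initializer, e.g. ['$$$-POS']), A returns E-/I- labels for that opening tag because it collides with the sentinel, while B returns the intended S-/B- start label for the first tag of a sequence. — e.g. on ot2bieos_ts(["$$$-POS"]): A returns ["E-POS"], B returns ["S-POS"]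
import Mathlib
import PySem

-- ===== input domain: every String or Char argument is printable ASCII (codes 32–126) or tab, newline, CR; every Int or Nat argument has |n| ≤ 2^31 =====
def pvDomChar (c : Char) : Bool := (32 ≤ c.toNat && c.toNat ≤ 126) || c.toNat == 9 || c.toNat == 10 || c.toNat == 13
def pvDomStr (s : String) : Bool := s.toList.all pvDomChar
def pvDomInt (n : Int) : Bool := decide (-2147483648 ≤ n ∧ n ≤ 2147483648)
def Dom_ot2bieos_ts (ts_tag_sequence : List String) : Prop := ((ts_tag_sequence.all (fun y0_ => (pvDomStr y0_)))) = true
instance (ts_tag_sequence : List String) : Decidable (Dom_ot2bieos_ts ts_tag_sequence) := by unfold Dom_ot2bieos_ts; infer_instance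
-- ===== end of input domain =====

-- B replaces A's single stateful pass (prev_pos threading + nested branches) by a run-scanning
-- algorithm: cut the sequence into maximal runs of equal extracted position, then label each run;
-- objective: alternative. Equal on Pre_ outside D_ (a first tag whose position part is the literal
-- sentinel '$$$', where A's comparison with its initializer suppresses the intended B-/S- label).

-- ===== PORT A =====
-- tag.split('-'): sep is the literal non-empty "-", so PySem.Str.split? is always some
def pvSplitDash (t : String) : List String := (PySem.Str.split? t "-").getD []

-- A's for-i loop over indices, as structural recursion carrying prev_pos; the head of the
-- remaining list is ts_tag_sequence[i+1], an empty remainder is i == n_tags - 1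
def ot2bieos_ts_go : List String → String → List String
  | [], _ => []
  | cur_ts_tag :: rest, prev_pos =>
    if cur_ts_tag = "O" ∨ cur_ts_tag = "EQ" then
      "O" :: ot2bieos_ts_go rest "O"
    else
      match pvSplitDash cur_ts_tag with
      | [cur_pos, cur_sentiment] =>
        (if cur_pos ≠ prev_pos then
          match rest with
          | [] => "S-" ++ cur_sentiment
          | next_ts_tag :: _ =>
            if next_ts_tag = "O" then "S-" ++ cur_sentiment else "B-" ++ cur_sentiment
        else
          match rest with
          | [] => "E-" ++ cur_sentiment
          | next_ts_tag :: _ =>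
            if next_ts_tag = "O" then "E-" ++ cur_sentiment else "I-" ++ cur_sentiment)
        :: ot2bieos_ts_go rest cur_pos
      | _ => []  -- Python raises ValueError here (unpacking); excluded by Pre_

def ot2bieos_ts (ts_tag_sequence : List String) : List String :=
  ot2bieos_ts_go ts_tag_sequence "$$$"

-- ===== PORT B =====
-- B's helper pos(t); split('-')[0] never raises (split is nonempty), so .getD 0 is exact
def pvPos (t : String) : String :=
  if t = "O" ∨ t = "EQ" then "O" else (pvSplitDash t).getD 0 ""

-- stage 1 of Source B: the for-loop body, carried state (runs, cur); cur[0] via headD (guarded by cur ≠ [])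
def pvStep (st : List (List String) × List String) (t : String) : List (List String) × List String :=
  if st.2 ≠ [] ∧ pvPos (st.2.headD "") = pvPos t then (st.1, st.2 ++ [t])
  else ((if st.2 = [] then st.1 else st.1 ++ [st.2]), [t])

def pvRuns (seq : List String) : List (List String) :=
  let st := seq.foldl pvStep ([], [])
  if st.2 = [] then st.1 else st.1 ++ [st.2]

-- stage 2 inner loop over one run; isFirst ↔ k == 0; split('-')[1] → getD (raises only outside Pre_)
def pvEmitGo : List String → Option String → Bool → List String
  | [], _, _ => []
  | t :: rest, nxtAfter, isFirst =>
    (if t = "O" ∨ t = "EQ" then "O"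
     else
       let s := (pvSplitDash t).getD 1 ""
       let nxt := match rest with | r :: _ => some r | [] => nxtAfter
       let e := nxt = none ∨ nxt = some "O"
       (if isFirst then (if e then "S" else "B") else (if e then "E" else "I")) ++ "-" ++ s)
    :: pvEmitGo rest nxtAfter false

-- stage 2 outer loop; runs[r+1][0] via head? (runs built by stage 1 are nonempty, exact there)
def pvRunsEmit : List (List String) → List String
  | [] => []
  | run :: rest =>
    pvEmitGo run (match rest with | [] => none | r2 :: _ => r2.head?) true ++ pvRunsEmit rest

def ot2bieos_ts_alt (ts_tag_sequence : List String) : List String :=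
  pvRunsEmit (pvRuns ts_tag_sequence)

-- ===== PRECONDITION & SPEC =====
-- Pre_ excludes exactly the inputs on which A raises ValueError: a tag other than 'O'/'EQ'
-- whose split on '-' does not have exactly two pieces.
def Pre_ot2bieos_ts (ts_tag_sequence : List String) : Prop :=
  ∀ t ∈ ts_tag_sequence, t = "O" ∨ t = "EQ" ∨ (pvSplitDash t).length = 2
instance (ts_tag_sequence : List String) : Decidable (Pre_ot2bieos_ts ts_tag_sequence) := by
  unfold Pre_ot2bieos_ts; infer_instance
def pvWitness_ot2bieos_ts : List String := ["T-POS", "T-POS", "O", "EQ", "T-NEG"]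

-- On sequences whose FIRST tag carries position part literally '$$$' (A's prev_pos initializer),
-- A labels that opening tag E-/I- (no entity start) because it collides with the sentinel, while
-- B labels it S-/B-, the intended start label for the first tag of a sequence.
def D_ot2bieos_ts (ts_tag_sequence : List String) : Prop :=
  ts_tag_sequence ≠ [] ∧ ts_tag_sequence.headD "" ≠ "O" ∧ ts_tag_sequence.headD "" ≠ "EQ" ∧
    (pvSplitDash (ts_tag_sequence.headD "")).getD 0 "" = "$$$"
instance (ts_tag_sequence : List String) : Decidable (D_ot2bieos_ts ts_tag_sequence) := by
  unfold D_ot2bieos_ts; infer_instance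

def Spec_ot2bieos_ts (ts_tag_sequence : List String) (out : List String) : Prop := ¬ D_ot2bieos_ts ts_tag_sequence → out = ot2bieos_ts_alt ts_tag_sequence
instance (ts_tag_sequence : List String) (out : List String) : Decidable (Spec_ot2bieos_ts ts_tag_sequence out) := by unfold Spec_ot2bieos_ts; infer_instance

def pvDiffWitness_ot2bieos_ts : List String := ["$$$-POS"]
def pvDiffWitnessOut_ot2bieos_ts : (List String) × (List String) := (["E-POS"], ["S-POS"])

-- ===== CLAIM (what is proved, stated in full; the proofs are below) =====
def Claim_unchanged_ot2bieos_ts : Prop := ∀ (ts_tag_sequence : List String), Dom_ot2bieos_ts ts_tag_sequence → Pre_ot2bieos_ts ts_tag_sequence → Spec_ot2bieos_ts ts_tag_sequence (ot2bieos_ts ts_tag_sequence)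
def Claim_changed_ot2bieos_ts : Prop := Dom_ot2bieos_ts (pvDiffWitness_ot2bieos_ts) ∧ Pre_ot2bieos_ts (pvDiffWitness_ot2bieos_ts) ∧ D_ot2bieos_ts (pvDiffWitness_ot2bieos_ts) ∧ ot2bieos_ts (pvDiffWitness_ot2bieos_ts) = pvDiffWitnessOut_ot2bieos_ts.1 ∧ ot2bieos_ts_alt (pvDiffWitness_ot2bieos_ts) = pvDiffWitnessOut_ot2bieos_ts.2 ∧ pvDiffWitnessOut_ot2bieos_ts.1 ≠ pvDiffWitnessOut_ot2bieos_ts.2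
def Claim_exact_ot2bieos_ts : Prop := ∀ (ts_tag_sequence : List String), Dom_ot2bieos_ts ts_tag_sequence → Pre_ot2bieos_ts ts_tag_sequence → D_ot2bieos_ts ts_tag_sequence → ot2bieos_ts ts_tag_sequence ≠ ot2bieos_ts_alt ts_tag_sequence

-- ===== LEMMAS AND PROOFS =====

-- proof-side view of B's stage 1: span-based maximal runs
def pvSpanRuns : List String → List (List String)
  | [] => []
  | t :: rest =>
    (t :: rest.takeWhile (fun x => pvPos x == pvPos t))
      :: pvSpanRuns (rest.dropWhile (fun x => pvPos x == pvPos t))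
termination_by l => l.length
decreasing_by
  simp only [List.length_cons]
  exact Nat.lt_succ_of_le (List.length_dropWhile_le _ _)

-- proof-side view of A: emit over runs, the run-head start flag compared against the incoming pos
def pvEmitA : List (List String) → String → List String
  | [], _ => []
  | run :: rest, pv =>
    pvEmitGo run (match rest with | [] => none | r2 :: _ => r2.head?) (!(pvPos (run.headD "") == pv))
      ++ pvEmitA rest (pvPos (run.headD ""))

lemma pvFoldl_runs (seq : List String) : ∀ (runs : List (List String)) (cur : List String),
    cur ≠ [] →
    (let st := seq.foldl pvStep (runs, cur); if st.2 = [] then st.1 else st.1 ++ [st.2])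
      = runs ++ (cur ++ seq.takeWhile (fun x => pvPos x == pvPos (cur.headD "")))
          :: pvSpanRuns (seq.dropWhile (fun x => pvPos x == pvPos (cur.headD ""))) := by
  induction seq with
  | nil => intro runs cur hc; simp [pvSpanRuns, hc]
  | cons t ts ih =>
    intro runs cur hc
    simp only [List.foldl_cons]
    by_cases h : pvPos (cur.headD "") = pvPos t
    · have h' : pvPos (cur.head?.getD "") = pvPos t := by
        cases cur with | nil => exact absurd rfl hc | cons a l => simpa using h
      have hstep : pvStep (runs, cur) t = (runs, cur ++ [t]) := by
        simp [pvStep, hc, h']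
      rw [hstep]
      have ih' := ih runs (cur ++ [t]) (by simp)
      have hhead : (cur ++ [t]).headD "" = cur.headD "" := by
        cases cur with | nil => exact absurd rfl hc | cons a l => simp
      rw [hhead] at ih'
      rw [ih']
      have hb : (pvPos t == pvPos (cur.head?.getD "")) = true := by
        rw [beq_iff_eq]; exact h'.symm
      simp [h']
    · have h' : ¬ pvPos (cur.head?.getD "") = pvPos t := by
        cases cur with | nil => exact absurd rfl hc | cons a l => simpa using h
      have hstep : pvStep (runs, cur) t = (runs ++ [cur], [t]) := by
        simp [pvStep, hc, h']
      rw [hstep]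
      have ih' := ih (runs ++ [cur]) [t] (by simp)
      simp only [List.headD_cons] at ih'
      rw [ih']
      have hb : (pvPos t == pvPos (cur.head?.getD "")) = false := by
        rw [beq_eq_false_iff_ne]; exact fun he => h' he.symm
      simp [hb, pvSpanRuns]

lemma pvRuns_eq_spanRuns (seq : List String) : pvRuns seq = pvSpanRuns seq := by
  cases seq with
  | nil => simp [pvRuns, pvSpanRuns]
  | cons t ts =>
    unfold pvRuns
    simp only [List.foldl_cons]
    have hstep : pvStep ([], []) t = ([], [t]) := by simp [pvStep]
    rw [hstep]
    have := pvFoldl_runs ts [] [t] (by simp)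
    simp only [List.headD_cons] at this
    rw [this]
    simp [pvSpanRuns]

-- one run of A's loop: inside a block of equal positions prev_pos stays the block position,
-- so only the block's first element can be labelled as a start
lemma pvGoRun (grp : List String) : ∀ (t : String) (rest' : List String) (pv : String),
    (t = "O" ∨ t = "EQ" ∨ (pvSplitDash t).length = 2) →
    (∀ x ∈ grp, pvPos x = pvPos t ∧ (x = "O" ∨ x = "EQ" ∨ (pvSplitDash x).length = 2)) →
    ot2bieos_ts_go (t :: (grp ++ rest')) pv
      = pvEmitGo (t :: grp) rest'.head? (!(pvPos t == pv)) ++ ot2bieos_ts_go rest' (pvPos t) := by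
  induction grp with
  | nil =>
    intro t rest' pv ht _
    by_cases hO : t = "O" ∨ t = "EQ"
    · have hp : pvPos t = "O" := by simp [pvPos, hO]
      simp only [List.nil_append, ot2bieos_ts_go, if_pos hO, pvEmitGo, hp]
      simp
    · rcases ht with h1 | h1 | h1
      · exact absurd (Or.inl h1) hO
      · exact absurd (Or.inr h1) hO
      · obtain ⟨cp, cs, hsplit⟩ : ∃ cp cs, pvSplitDash t = [cp, cs] := by
          match hs : pvSplitDash t with
          | [a, b] => exact ⟨a, b, rfl⟩
          | [] => rw [hs] at h1; simp at h1
          | [a] => rw [hs] at h1; simp at h1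
          | a :: b :: c :: l => rw [hs] at h1; simp at h1
        have hp : pvPos t = cp := by simp [pvPos, hO, hsplit]
        simp only [List.nil_append, ot2bieos_ts_go, if_neg hO, hsplit, pvEmitGo, hp]
        cases rest' with
        | nil => by_cases hpv : cp = pv <;> simp [hpv]
        | cons r rs =>
          by_cases hpv : cp = pv <;> by_cases hr : r = "O" <;>
            simp [hpv, hr, List.head?]
  | cons g gs ih =>
    intro t rest' pv ht hgrp
    have hg := hgrp g (by simp)
    have hgs : ∀ x ∈ gs, pvPos x = pvPos g ∧ (x = "O" ∨ x = "EQ" ∨ (pvSplitDash x).length = 2) := by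
      intro x hx
      obtain ⟨h1, h2⟩ := hgrp x (by simp [hx])
      exact ⟨h1.trans hg.1.symm, h2⟩
    have ihg := ih g rest' (pvPos t) hg.2 hgs
    have hflag : (!(pvPos g == pvPos t)) = false := by simp [hg.1]
    rw [hflag] at ihg
    rw [hg.1] at ihg
    by_cases hO : t = "O" ∨ t = "EQ"
    · have hp : pvPos t = "O" := by simp [pvPos, hO]
      simp only [List.cons_append, ot2bieos_ts_go, if_pos hO, pvEmitGo, hp] at ihg ⊢
      rw [ihg]
    · rcases ht with h1 | h1 | h1
      · exact absurd (Or.inl h1) hO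
      · exact absurd (Or.inr h1) hO
      · obtain ⟨cp, cs, hsplit⟩ : ∃ cp cs, pvSplitDash t = [cp, cs] := by
          match hs : pvSplitDash t with
          | [a, b] => exact ⟨a, b, rfl⟩
          | [] => rw [hs] at h1; simp at h1
          | [a] => rw [hs] at h1; simp at h1
          | a :: b :: c :: l => rw [hs] at h1; simp at h1
        have hp : pvPos t = cp := by simp [pvPos, hO, hsplit]
        simp only [List.cons_append, ot2bieos_ts_go, if_neg hO, hsplit, pvEmitGo] at ihg ⊢
        rw [hp] at ihg
        rw [ihg]
        by_cases hpv : cp = pv <;> by_cases hgO : g = "O" <;>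
          simp [hpv, hgO, hp, List.head?]

-- the first tag of the next span run is the head of the remaining list
lemma pvSpanRuns_head (l : List String) :
    (match pvSpanRuns l with | [] => none | r2 :: _ => r2.head?) = l.head? := by
  cases l with
  | nil => simp [pvSpanRuns]
  | cons u us => simp [pvSpanRuns]

lemma pvHead_dropWhile_ne (p : String → Bool) (l : List String) (u : String) (us : List String)
    (h : l.dropWhile p = u :: us) : p u = false := by
  have := List.head?_dropWhile_not p l
  rw [h] at this
  simpa using this

lemma pvA_eq_emitA : ∀ (n : Nat) (seq : List String) (pv : String), seq.length ≤ n →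
    Pre_ot2bieos_ts seq → ot2bieos_ts_go seq pv = pvEmitA (pvSpanRuns seq) pv := by
  intro n
  induction n with
  | zero =>
    intro seq pv hlen _
    have : seq = [] := List.eq_nil_of_length_eq_zero (Nat.le_zero.mp hlen)
    subst this; simp [pvSpanRuns, pvEmitA, ot2bieos_ts_go]
  | succ m ih =>
    intro seq pv hlen hpre
    cases seq with
    | nil => simp [pvSpanRuns, pvEmitA, ot2bieos_ts_go]
    | cons t ts =>
      set grp := ts.takeWhile (fun x => pvPos x == pvPos t) with hgrpdef
      set rest' := ts.dropWhile (fun x => pvPos x == pvPos t) with hrestdef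
      have hts : ts = grp ++ rest' := (List.takeWhile_append_dropWhile).symm
      have ht := hpre t (by simp)
      have hgrp : ∀ x ∈ grp, pvPos x = pvPos t ∧ (x = "O" ∨ x = "EQ" ∨ (pvSplitDash x).length = 2) := by
        intro x hx
        refine ⟨by simpa using List.mem_takeWhile_imp hx, ?_⟩
        exact hpre x (by rw [hts]; exact List.mem_cons_of_mem _ (List.mem_append_left _ hx))
      have hgo : ot2bieos_ts_go (t :: ts) pv
          = pvEmitGo (t :: grp) rest'.head? (!(pvPos t == pv)) ++ ot2bieos_ts_go rest' (pvPos t) := by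
        conv_lhs => rw [hts]
        exact pvGoRun grp t rest' pv ht hgrp
      rw [hgo, pvSpanRuns]
      simp only [pvEmitA, List.headD_cons]
      rw [pvSpanRuns_head]
      congr 1
      have hlen' : rest'.length ≤ m := by
        have h1 := List.length_dropWhile_le (fun x => pvPos x == pvPos t) ts
        rw [← hrestdef] at h1
        have h2 : ts.length ≤ m := by simpa using hlen
        omega
      have hpre' : Pre_ot2bieos_ts rest' := by
        intro x hx
        exact hpre x (by rw [hts]; exact List.mem_cons_of_mem _ (List.mem_append_right _ hx))
      exact ih rest' (pvPos t) hlen' hpre'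

lemma pvB_eq_emitA : ∀ (n : Nat) (seq : List String) (pv : String), seq.length ≤ n →
    (seq = [] ∨ pvPos (seq.headD "") ≠ pv) →
    pvRunsEmit (pvSpanRuns seq) = pvEmitA (pvSpanRuns seq) pv := by
  intro n
  induction n with
  | zero =>
    intro seq pv hlen _
    have : seq = [] := List.eq_nil_of_length_eq_zero (Nat.le_zero.mp hlen)
    subst this; simp [pvSpanRuns, pvRunsEmit, pvEmitA]
  | succ m ih =>
    intro seq pv hlen hne
    cases seq with
    | nil => simp [pvSpanRuns, pvRunsEmit, pvEmitA]
    | cons t ts =>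
      have hp : pvPos t ≠ pv := by
        rcases hne with h | h
        · exact absurd h (by simp)
        · simpa using h
      rw [pvSpanRuns]
      simp only [pvRunsEmit, pvEmitA, List.headD_cons]
      rw [pvSpanRuns_head]
      have hflag : (!(pvPos t == pv)) = true := by simp [hp]
      rw [hflag]
      congr 1
      set rest' := ts.dropWhile (fun x => pvPos x == pvPos t) with hrest
      have hlen' : rest'.length ≤ m := by
        have h1 := List.length_dropWhile_le (fun x => pvPos x == pvPos t) ts
        rw [← hrest] at h1
        have h2 : ts.length ≤ m := by simpa using hlen
        omega
      apply ih rest' (pvPos t) hlen'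
      cases hr : rest' with
      | nil => exact Or.inl rfl
      | cons u us =>
        right
        have := pvHead_dropWhile_ne _ ts u us (hrest ▸ hr)
        simpa using this

-- ¬D_ gives exactly the side condition pvB_eq_emitA needs at pv = "$$$"
lemma pvNotD_head (seq : List String) (hpre : Pre_ot2bieos_ts seq)
    (hnd : ¬ D_ot2bieos_ts seq) : seq = [] ∨ pvPos (seq.headD "") ≠ "$$$" := by
  cases seq with
  | nil => exact Or.inl rfl
  | cons t ts =>
    right
    simp only [List.headD_cons]
    by_cases hO : t = "O" ∨ t = "EQ"
    · simp [pvPos, hO]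
    · have : ¬ (pvSplitDash t).getD 0 "" = "$$$" := by
        intro h
        exact hnd ⟨by simp, by simpa using fun h1 => hO (Or.inl h1),
          by simpa using fun h1 => hO (Or.inr h1), by simpa using h⟩
      simpa [pvPos, hO] using this

-- ===== VERDICT (by name: the statement is the Claim_ definition above) =====
theorem ot2bieos_ts_spec : Claim_unchanged_ot2bieos_ts := by
  intro seq _ hpre hnd
  unfold ot2bieos_ts ot2bieos_ts_alt
  rw [pvRuns_eq_spanRuns,
    pvB_eq_emitA seq.length seq "$$$" (Nat.le_refl _) (pvNotD_head seq hpre hnd)]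
  exact pvA_eq_emitA seq.length seq "$$$" (Nat.le_refl _) hpre

theorem ot2bieos_ts_changed : Claim_changed_ot2bieos_ts := by
  unfold Claim_changed_ot2bieos_ts; decide

theorem ot2bieos_ts_tight : Claim_exact_ot2bieos_ts := by
  intro seq _ hpre hD heq
  obtain ⟨hne, h1, h2, h3⟩ := hD
  cases seq with
  | nil => exact hne rfl
  | cons t ts =>
    simp only [List.headD_cons] at h1 h2 h3
    have hO : ¬ (t = "O" ∨ t = "EQ") := by rintro (h | h); exacts [h1 h, h2 h]
    have ht := hpre t (by simp)
    have hlen2 : (pvSplitDash t).length = 2 := by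
      rcases ht with h | h | h; exacts [absurd h h1, absurd h h2, h]
    obtain ⟨cp, cs, hsplit⟩ : ∃ cp cs, pvSplitDash t = [cp, cs] := by
      match hs : pvSplitDash t with
      | [a, b] => exact ⟨a, b, rfl⟩
      | [] => rw [hs] at hlen2; simp at hlen2
      | [a] => rw [hs] at hlen2; simp at hlen2
      | a :: b :: c :: l => rw [hs] at hlen2; simp at hlen2
    have hcp : cp = "$$$" := by rw [hsplit] at h3; simpa using h3
    subst hcp
    -- A's first output label is E-/I- (no start: the tag position equals the sentinel)
    have hA : (ot2bieos_ts (t :: ts)).head?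
        = some ((if ts.head? = none ∨ ts.head? = some "O" then "E-" else "I-") ++ cs) := by
      unfold ot2bieos_ts
      cases ts with
      | nil => simp [ot2bieos_ts_go, hO, hsplit]
      | cons u us => by_cases hu : u = "O" <;> simp [ot2bieos_ts_go, hO, hsplit, hu]
    -- B's first output label is S-/B- (the run head starts)
    unfold ot2bieos_ts_alt at heq
    rw [pvRuns_eq_spanRuns, pvSpanRuns] at heq
    simp only [pvRunsEmit, pvEmitGo, if_neg hO, hsplit, List.cons_append] at heq
    have hhead := congrArg List.head? heq
    rw [hA] at hhead
    simp only [List.head?_cons, Option.some.injEq] at hhead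
    split_ifs at hhead <;>
      (have := congrArg String.toList hhead; simp at this)
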